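-- pv_equiv track=rewrite | github.com/DmytroQasttor/aivironment-agents-example | python-agent/app/mcp_client.py | _pick_rpc_response
-- ===== SOURCE A (Python) =====
-- from typing import Any
--
-- def _pick_rpc_response(responses: list[dict[str, Any]], request_id: int) -> dict[str, Any] | None:
--     for response in responses:
--         if response.get("id") == request_id:
--             return response
--     for response in responses:
--         if "result" in response or "error" in response:
--             return response
--     return None
-- ===== SOURCE B (Python) =====
-- def _pick_rpc_response(responses, request_id):
--     # One back-to-front pass: after processing, m is the FIRST id-match and
--     # f the FIRST result/error response (later assignments are overwritten
--     # by earlier elements as we walk backwards).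
--     m = None
--     f = None
--     for r in reversed(responses):
--         if r.get("id") == request_id:
--             m = r
--         if "result" in r or "error" in r:
--             f = r
--     return m if m is not None else f
-- ===== Notes on version B (the rewrite author's own statement) =====
-- stated objective: alternative
-- what changed: Replaces A's two forward scans with early returns by a single backwards pass that maintains both the first id-match and the first result/error fallback, combined at the end.
import Mathlib
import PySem

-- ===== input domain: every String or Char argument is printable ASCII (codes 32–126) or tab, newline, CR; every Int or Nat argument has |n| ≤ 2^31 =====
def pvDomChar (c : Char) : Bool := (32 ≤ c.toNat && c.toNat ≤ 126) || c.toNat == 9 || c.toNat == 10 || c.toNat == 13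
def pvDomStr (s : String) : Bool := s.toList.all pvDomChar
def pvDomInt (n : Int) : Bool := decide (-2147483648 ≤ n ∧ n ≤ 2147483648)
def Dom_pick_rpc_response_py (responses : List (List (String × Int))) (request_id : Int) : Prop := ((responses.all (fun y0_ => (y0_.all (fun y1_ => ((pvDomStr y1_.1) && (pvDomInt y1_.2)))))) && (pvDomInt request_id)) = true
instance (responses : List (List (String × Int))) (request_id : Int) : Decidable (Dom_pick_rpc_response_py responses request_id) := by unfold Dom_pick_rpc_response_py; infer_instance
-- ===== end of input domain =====

-- ===== PORT A =====
-- B replaces A's two forward scans with one backwards pass maintaining both candidates (objective: alternative).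
-- dict.get("id") = value of the first pair with key "id" (association-list convention)
def pvGetId (r : List (String × Int)) : Option Int := (r.find? (fun p => p.1 == "id")).map (·.2)
-- '"k" in response'
def pvHasKey (r : List (String × Int)) (k : String) : Bool := r.any (fun p => p.1 == k)
-- A's first loop: return the first response whose id equals request_id
def pickA1 : List (List (String × Int)) → Int → Option (List (String × Int))
  | [], _ => none
  | r :: rest, rid => if pvGetId r == some rid then some r else pickA1 rest rid
-- A's second loop: return the first response containing "result" or "error"
def pickA2 : List (List (String × Int)) → Option (List (String × Int))
  | [] => none
  | r :: rest => if pvHasKey r "result" || pvHasKey r "error" then some r else pickA2 rest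
def pick_rpc_response_py (responses : List (List (String × Int))) (request_id : Int) : Option (List (String × Int)) :=
  match pickA1 responses request_id with
  | some r => some r
  | none => pickA2 responses

-- ===== PORT B =====
-- B's backwards loop body: update (m, f) for one response r
def pickBStep (rid : Int) (acc : Option (List (String × Int)) × Option (List (String × Int)))
    (r : List (String × Int)) : Option (List (String × Int)) × Option (List (String × Int)) :=
  (if r.lookup "id" == some rid then some r else acc.1,
   if (r.lookup "result").isSome || (r.lookup "error").isSome then some r else acc.2)
def pick_rpc_response_py_alt (responses : List (List (String × Int))) (request_id : Int) : Option (List (String × Int)) :=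
  let (m, f) := responses.reverse.foldl (pickBStep request_id) (none, none)
  Option.or m f

-- ===== PRECONDITION & SPEC =====
def Spec_pick_rpc_response_py (responses : List (List (String × Int))) (request_id : Int) (out : Option (List (String × Int))) : Prop := out = pick_rpc_response_py_alt responses request_id
instance (responses : List (List (String × Int))) (request_id : Int) (out : Option (List (String × Int))) : Decidable (Spec_pick_rpc_response_py responses request_id out) := by unfold Spec_pick_rpc_response_py; infer_instance

-- ===== CLAIM (what is proved, stated in full; the proofs are below) =====
def Claim_equal_pick_rpc_response_py : Prop := ∀ (responses : List (List (String × Int))) (request_id : Int), Dom_pick_rpc_response_py responses request_id → Spec_pick_rpc_response_py responses request_id (pick_rpc_response_py responses request_id)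

-- ===== LEMMAS AND PROOFS =====
theorem pvFindIsSomeAny {α : Type} (p : α → Bool) (l : List α) : (l.find? p).isSome = l.any p := by
  induction l with
  | nil => rfl
  | cons a l ih => rw [List.find?_cons, List.any_cons]; cases p a <;> simp [ih]

theorem pickBFold_eq (rid : Int) (rs : List (List (String × Int))) :
    rs.reverse.foldl (pickBStep rid) (none, none) = (pickA1 rs rid, pickA2 rs) := by
  rw [List.foldl_reverse]
  induction rs with
  | nil => rfl
  | cons r rest ih =>
    have hl : ∀ (k : String), r.lookup k = (r.find? (fun p => p.1 == k)).map (·.2) := by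
      intro k
      induction r with
      | nil => rfl
      | cons p ps ihp =>
        by_cases h : p.1 = k
        · simp [List.lookup, List.find?, h]
        · have h1 : (k == p.1) = false := by simp [Ne.symm h]
          have h2 : (p.1 == k) = false := by simp [h]
          simp [List.lookup, List.find?, h1, h2, ihp]
    rw [List.foldr_cons, ih]
    simp only [pickBStep, pickA1, pickA2, hl, pvGetId, pvHasKey]
    refine congrArg₂ Prod.mk rfl ?_
    simp only [Option.isSome_map, pvFindIsSomeAny]
    rfl

-- ===== VERDICT (by name: the statement is the Claim_ definition above) =====
theorem pick_rpc_response_py_spec : Claim_equal_pick_rpc_response_py := by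
  intro responses request_id _
  unfold Spec_pick_rpc_response_py pick_rpc_response_py pick_rpc_response_py_alt
  rw [pickBFold_eq]
  cases pickA1 responses request_id <;> rfl
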